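-- pv_equiv track=rewrite | github.com/grapheneaffiliate/h4-polytopic-attention | solve_b10.py | solve_6e82a1ae
-- ===== SOURCE A (Python) =====
-- def solve_6e82a1ae(grid):
--     rows, cols = len(grid), len(grid[0])
--     out = [[0]*cols for _ in range(rows)]
--     visited = set()
--     blobs = []
--     for r in range(rows):
--         for c in range(cols):
--             if grid[r][c] == 5 and (r,c) not in visited:
--                 blob = []
--                 stack = [(r,c)]
--                 while stack:
--                     cr,cc = stack.pop()
--                     if (cr,cc) in visited or grid[cr][cc] != 5:
--                         continue
--                     visited.add((cr,cc))
--                     blob.append((cr,cc))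
--                     for dr,dc in [(-1,0),(1,0),(0,-1),(0,1)]:
--                         nr,nc = cr+dr,cc+dc
--                         if 0<=nr<rows and 0<=nc<cols and (nr,nc) not in visited:
--                             stack.append((nr,nc))
--                 blobs.append(blob)
--     sizes = sorted(set(len(b) for b in blobs), reverse=True)
--     size_to_color = {s: i+1 for i, s in enumerate(sizes)}
--     for blob in blobs:
--         color = size_to_color[len(blob)]
--         for r,c in blob:
--             out[r][c] = color
--     return out
-- ===== SOURCE B (Python) =====
-- def solve_6e82a1ae(grid):
--     rows, cols = len(grid), len(grid[0])
--     # connected components by label merging: give every 5-cell its own label,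
--     # then for each right/down adjacency between 5-cells merge the two classes
--     # by relabeling one class to the other's label.
--     label = {}
--     for r in range(rows):
--         for c in range(cols):
--             if grid[r][c] == 5:
--                 label[(r, c)] = (r, c)
--     for r in range(rows):
--         for c in range(cols):
--             p = (r, c)
--             if p in label:
--                 for q in ((r, c + 1), (r + 1, c)):
--                     if q in label and label[q] != label[p]:
--                         old, new = label[q], label[p]
--                         for k in label:
--                             if label[k] == old:
--                                 label[k] = new
--     size = {}
--     for k in label:
--         size[label[k]] = size.get(label[k], 0) + 1
--     ranks = {s: i + 1 for i, s in enumerate(sorted(set(size.values()), reverse=True))}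
--     return [[ranks[size[label[(r, c)]]] if (r, c) in label else 0
--              for c in range(cols)]
--             for r in range(rows)]
-- ===== Notes on version B (the rewrite author's own statement) =====
-- stated objective: alternative
-- what changed: Replaces the DFS flood fill with an explicit stack by a union-by-relabeling connected-components pass: every 5-cell starts as its own labelled class, each right/down adjacency between 5-cells merges the two classes by rewriting one label, and sizes/colors are then read off per label instead of per blob list.
import Mathlib
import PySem

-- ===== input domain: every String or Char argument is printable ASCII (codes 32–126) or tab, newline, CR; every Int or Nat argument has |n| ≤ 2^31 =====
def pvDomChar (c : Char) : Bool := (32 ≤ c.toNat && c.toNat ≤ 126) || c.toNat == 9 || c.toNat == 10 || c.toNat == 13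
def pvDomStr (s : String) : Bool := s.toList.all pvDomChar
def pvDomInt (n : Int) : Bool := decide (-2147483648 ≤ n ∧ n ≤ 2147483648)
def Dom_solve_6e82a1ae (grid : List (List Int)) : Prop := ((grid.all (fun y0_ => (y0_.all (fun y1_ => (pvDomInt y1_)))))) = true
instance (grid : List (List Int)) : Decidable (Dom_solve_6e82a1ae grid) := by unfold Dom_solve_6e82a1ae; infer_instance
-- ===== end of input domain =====

-- B replaces A's explicit-stack DFS flood fill by a union-by-relabeling
-- connected-components pass (each right/down adjacency merges two labelled
-- classes); objective: alternative algorithm, same exact output.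

-- ===== PORT A =====

-- grid[r][c]; exact wherever A evaluates it (always in bounds under Pre_)
def pvCell (grid : List (List Int)) (p : Int × Int) : Int :=
  PySem.List.pyGetD (PySem.List.pyGetD grid p.1 []) p.2 0

-- the inner `while stack:` loop of A; `fuel` only makes the loop total,
-- it is proven sufficient under Pre_ (the loop always terminates in Python)
def pvADfs (grid : List (List Int)) (rows cols : Int) :
    Nat → List (Int × Int) → PySem.Set (Int × Int) → List (Int × Int) →
    PySem.Set (Int × Int) × List (Int × Int)
  | 0, _, visited, blob => (visited, blob)
  | _ + 1, [], visited, blob => (visited, blob)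
  | fuel + 1, p :: stack, visited, blob =>
    if PySem.Set.contains visited p || !(pvCell grid p == 5) then
      pvADfs grid rows cols fuel stack visited blob
    else
      let visited' := PySem.Set.add visited p
      let blob' := blob ++ [p]
      -- Python appends candidates at the stack's end and pops from the end;
      -- consing each candidate onto the head gives the identical pop order
      let stack' := [((-1 : Int), (0 : Int)), (1, 0), (0, -1), (0, 1)].foldl
        (fun st d =>
          let n := (p.1 + d.1, p.2 + d.2)
          if (0 ≤ n.1 && n.1 < rows && 0 ≤ n.2 && n.2 < cols) &&
              !(PySem.Set.contains visited' n) then n :: st else st) stack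
      pvADfs grid rows cols fuel stack' visited' blob'

-- the two nested `for` loops collecting `visited` and `blobs`
def pvAScan (grid : List (List Int)) (rows cols : Int) (fuel : Nat) :
    PySem.Set (Int × Int) × List (List (Int × Int)) :=
  (PySem.List.pyRange 0 rows 1).foldl (fun acc r =>
    (PySem.List.pyRange 0 cols 1).foldl (fun acc c =>
      if pvCell grid (r, c) == 5 && !(PySem.Set.contains acc.1 (r, c)) then
        let res := pvADfs grid rows cols fuel [(r, c)] acc.1 []
        (res.1, acc.2 ++ [res.2])
      else acc) acc) ([], [])

def solve_6e82a1ae (grid : List (List Int)) : List (List Int) :=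
  let rows : Int := grid.length
  let cols : Int := (PySem.List.pyGetD grid 0 []).length
  let blobs := (pvAScan grid rows cols
    (5 * grid.length * (PySem.List.pyGetD grid 0 []).length + 5)).2
  let sizes := PySem.List.sorted
    (PySem.Set.ofList (blobs.map (fun b => (b.length : Int)))) (fun s => s) true
  let size_to_color := (PySem.List.enumerate sizes 0).foldl
    (fun d is => PySem.Dict.insert d is.2 (is.1 + 1)) (PySem.Dict.mk [])
  let out0 : List (List Int) := (PySem.List.pyRange 0 rows 1).map
    (fun _ => (PySem.List.pyRange 0 cols 1).map (fun _ => (0 : Int)))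
  blobs.foldl (fun out b =>
    let color := PySem.Dict.getD size_to_color (b.length : Int) 0
    -- out[r][c] = color: r, c are nonnegative in-range indices here, so
    -- List.set at .toNat is exact
    b.foldl (fun out p =>
      out.modify p.1.toNat (fun row => row.set p.2.toNat color)) out) out0

-- ===== PORT B =====

def solve_6e82a1ae_alt (grid : List (List Int)) : List (List Int) :=
  let rows : Int := grid.length
  let cols : Int := (PySem.List.pyGetD grid 0 []).length
  let label0 : PySem.Dict (Int × Int) (Int × Int) :=
    (PySem.List.pyRange 0 rows 1).foldl (fun d r =>
      (PySem.List.pyRange 0 cols 1).foldl (fun d c =>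
        if PySem.List.pyGetD (PySem.List.pyGetD grid r []) c 0 == 5 then
          d.insert (r, c) (r, c)
        else d) d) (PySem.Dict.mk [])
  let label :=
    (PySem.List.pyRange 0 rows 1).foldl (fun d r =>
      (PySem.List.pyRange 0 cols 1).foldl (fun d c =>
        if d.contains (r, c) then
          [(r, c + 1), (r + 1, c)].foldl (fun d q =>
            if d.contains q && !(d.getD q (r, c) == d.getD (r, c) (r, c)) then
              -- `for k in label: if label[k] == old: label[k] = new` rewrites
              -- values in place, keys unchanged: exactly a map over the items
              PySem.Dict.mk (d.items.map (fun kv =>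
                if kv.2 == d.getD q (r, c) then (kv.1, d.getD (r, c) (r, c))
                else kv))
            else d) d
        else d) d) label0
  -- `for k in label:` iterates keys in insertion order; keys are unique, so
  -- label[k] is the item's value: iterate the items directly
  let size : PySem.Dict (Int × Int) Int :=
    label.items.foldl (fun s kv => s.insert kv.2 (s.getD kv.2 0 + 1))
      (PySem.Dict.mk [])
  let ranks := (PySem.List.enumerate (PySem.List.sorted
      (PySem.Set.ofList size.values) (fun s => s) true) 0).foldl
    (fun d is => PySem.Dict.insert d is.2 (is.1 + 1)) (PySem.Dict.mk [])
  (PySem.List.pyRange 0 rows 1).map (fun r =>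
    (PySem.List.pyRange 0 cols 1).map (fun c =>
      if label.contains (r, c) then
        ranks.getD (size.getD (label.getD (r, c) (r, c)) 0) 0
      else 0))

-- ===== PRECONDITION & SPEC =====

-- Pre_ excludes exactly the inputs on which A raises IndexError: the empty
-- grid (len(grid[0])) and grids with a row shorter than the first row
-- (grid[r][c] is read for every c < len(grid[0])).
def Pre_solve_6e82a1ae (grid : List (List Int)) : Prop :=
  grid ≠ [] ∧ ∀ row ∈ grid, (grid.headD []).length ≤ row.length
instance (grid : List (List Int)) : Decidable (Pre_solve_6e82a1ae grid) := by
  unfold Pre_solve_6e82a1ae; infer_instance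

def pvWitness_solve_6e82a1ae : List (List Int) := [[5, 0], [5, 5]]

def Spec_solve_6e82a1ae (grid : List (List Int)) (out : List (List Int)) : Prop :=
  out = solve_6e82a1ae_alt grid
instance (grid : List (List Int)) (out : List (List Int)) :
    Decidable (Spec_solve_6e82a1ae grid out) := by
  unfold Spec_solve_6e82a1ae; infer_instance

-- ===== CLAIM (what is proved, stated in full; the proofs are below) =====
def Claim_equal_solve_6e82a1ae : Prop :=
  ∀ (grid : List (List Int)), Dom_solve_6e82a1ae grid →
    Pre_solve_6e82a1ae grid → Spec_solve_6e82a1ae grid (solve_6e82a1ae grid)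

-- ===== LEMMAS AND PROOFS =====

-- ---------- basic geometry ----------

def pvR (grid : List (List Int)) : Int := grid.length
def pvC (grid : List (List Int)) : Int := (PySem.List.pyGetD grid 0 []).length
def pvN (grid : List (List Int)) : Nat := grid.length * (PySem.List.pyGetD grid 0 []).length

def pvInB (grid : List (List Int)) (p : Int × Int) : Prop :=
  0 ≤ p.1 ∧ p.1 < pvR grid ∧ 0 ≤ p.2 ∧ p.2 < pvC grid

def pvFive (grid : List (List Int)) (p : Int × Int) : Prop :=
  pvInB grid p ∧ pvCell grid p = 5

def pvAdj (p q : Int × Int) : Prop :=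
  (q.1 = p.1 - 1 ∧ q.2 = p.2) ∨ (q.1 = p.1 + 1 ∧ q.2 = p.2) ∨
  (q.1 = p.1 ∧ q.2 = p.2 - 1) ∨ (q.1 = p.1 ∧ q.2 = p.2 + 1)

def pvStep (grid : List (List Int)) (p q : Int × Int) : Prop :=
  pvFive grid p ∧ pvFive grid q ∧ pvAdj p q

def pvConn (grid : List (List Int)) (p q : Int × Int) : Prop :=
  Relation.ReflTransGen (pvStep grid) p q

theorem pvAdj_symm {p q : Int × Int} (h : pvAdj p q) : pvAdj q p := by
  unfold pvAdj at h ⊢; omega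

theorem pvStep_symm {grid : List (List Int)} {p q : Int × Int} (h : pvStep grid p q) :
    pvStep grid q p := ⟨h.2.1, h.1, pvAdj_symm h.2.2⟩

theorem pvConn_symm {grid : List (List Int)} {p q : Int × Int} (h : pvConn grid p q) :
    pvConn grid q p :=
  Relation.ReflTransGen.symmetric (fun _ _ hs => pvStep_symm hs) h

theorem pvConn_trans {grid : List (List Int)} {p q r : Int × Int}
    (h1 : pvConn grid p q) (h2 : pvConn grid q r) : pvConn grid p r :=
  Relation.ReflTransGen.trans h1 h2

-- a Nodup list of in-bounds positions has at most pvN elements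
theorem pvLen_le (grid : List (List Int)) (l : List (Int × Int)) (hn : l.Nodup)
    (hb : ∀ p ∈ l, pvInB grid p) : l.length ≤ pvN grid := by
  classical
  have hsub : l.toFinset ⊆ (Finset.Ico (0:Int) (pvR grid)) ×ˢ (Finset.Ico (0:Int) (pvC grid)) := by
    intro p hp
    have hb' := hb p (List.mem_toFinset.mp hp)
    simp [Finset.mem_product, Finset.mem_Ico]
    exact ⟨⟨hb'.1, hb'.2.1⟩, hb'.2.2.1, hb'.2.2.2⟩
  have hcard := Finset.card_le_card hsub
  have hl : l.toFinset.card = l.length := List.toFinset_card_of_nodup hn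
  have : ((Finset.Ico (0:Int) (pvR grid)) ×ˢ (Finset.Ico (0:Int) (pvC grid))).card = pvN grid := by
    simp [Finset.card_product, Int.card_Ico, pvR, pvC, pvN]
  omega

-- one four-direction push step of A's DFS, as a generic fold over directions
theorem pvPushGen (rows cols : Int) (p : Int × Int) (V : PySem.Set (Int × Int)) :
    ∀ (ds : List (Int × Int)) (st : List (Int × Int)) (q : Int × Int),
    (q ∈ ds.foldl (fun st d =>
        let n := (p.1 + d.1, p.2 + d.2)
        if (0 ≤ n.1 && n.1 < rows && 0 ≤ n.2 && n.2 < cols) &&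
            !(PySem.Set.contains V n) then n :: st else st) st ↔
      ((∃ d ∈ ds, q = (p.1 + d.1, p.2 + d.2)) ∧
        0 ≤ q.1 ∧ q.1 < rows ∧ 0 ≤ q.2 ∧ q.2 < cols ∧ q ∉ V) ∨ q ∈ st) ∧
    (ds.foldl (fun st d =>
        let n := (p.1 + d.1, p.2 + d.2)
        if (0 ≤ n.1 && n.1 < rows && 0 ≤ n.2 && n.2 < cols) &&
            !(PySem.Set.contains V n) then n :: st else st) st).length ≤
      st.length + ds.length := by
  intro ds
  induction ds with
  | nil => simp
  | cons d ds ih =>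
    intro st q
    simp only [List.foldl_cons]
    have hcond : ∀ n : Int × Int,
        (((0 ≤ n.1 && n.1 < rows && 0 ≤ n.2 && n.2 < cols) && !(PySem.Set.contains V n)) = true) ↔
        (0 ≤ n.1 ∧ n.1 < rows ∧ 0 ≤ n.2 ∧ n.2 < cols ∧ n ∉ V) := by
      intro n; simp [PySem.Set.contains, and_assoc]
    constructor
    · rw [(ih _ q).1]
      split_ifs with hb
      · have h := (hcond (p.1 + d.1, p.2 + d.2)).mp hb
        simp only [List.mem_cons]
        constructor
        · rintro (⟨⟨d', hd', hq⟩, hB⟩ | hq | hq)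
          · exact Or.inl ⟨⟨d', Or.inr hd', hq⟩, hB⟩
          · subst hq; exact Or.inl ⟨⟨d, Or.inl rfl, rfl⟩, h⟩
          · exact Or.inr hq
        · rintro (⟨⟨d', hd' | hd', hq⟩, hB⟩ | hq)
          · subst hd'; exact Or.inr (Or.inl hq)
          · exact Or.inl ⟨⟨d', hd', hq⟩, hB⟩
          · exact Or.inr (Or.inr hq)
      · have h : ¬(0 ≤ p.1 + d.1 ∧ p.1 + d.1 < rows ∧ 0 ≤ p.2 + d.2 ∧ p.2 + d.2 < cols ∧
            (p.1 + d.1, p.2 + d.2) ∉ V) := fun hp => hb ((hcond (p.1 + d.1, p.2 + d.2)).mpr hp)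
        simp only [List.mem_cons]
        constructor
        · rintro (⟨⟨d', hd', hq⟩, hB⟩ | hq)
          · exact Or.inl ⟨⟨d', Or.inr hd', hq⟩, hB⟩
          · exact Or.inr hq
        · rintro (⟨⟨d', hd' | hd', hq⟩, hB⟩ | hq)
          · exfalso; subst hd'; subst hq; exact h hB
          · exact Or.inl ⟨⟨d', hd', hq⟩, hB⟩
          · exact Or.inr hq
    · simp only [List.length_cons]
      refine le_trans (ih _ q).2 ?_
      beta_reduce
      split_ifs
      · simp
        omega
      · simp

-- membership in the stack produced by the four-direction push of A's DFS
theorem pvPush_mem (rows cols : Int) (p : Int × Int) (V : PySem.Set (Int × Int))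
    (st : List (Int × Int)) (q : Int × Int) :
    q ∈ ([((-1 : Int), (0 : Int)), (1, 0), (0, -1), (0, 1)].foldl
      (fun st d =>
        let n := (p.1 + d.1, p.2 + d.2)
        if (0 ≤ n.1 && n.1 < rows && 0 ≤ n.2 && n.2 < cols) &&
            !(PySem.Set.contains V n) then n :: st else st) st) ↔
    ((pvAdj p q ∧ 0 ≤ q.1 ∧ q.1 < rows ∧ 0 ≤ q.2 ∧ q.2 < cols ∧ q ∉ V) ∨ q ∈ st) := by
  rw [(pvPushGen rows cols p V _ st q).1]
  have : (∃ d ∈ [((-1 : Int), (0 : Int)), (1, 0), (0, -1), (0, 1)],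
      q = (p.1 + d.1, p.2 + d.2)) ↔ pvAdj p q := by
    obtain ⟨q1, q2⟩ := q
    simp only [List.mem_cons, List.not_mem_nil, or_false, exists_eq_or_imp, exists_eq_left,
      Prod.mk.injEq, pvAdj]
    constructor <;> intro h <;> omega
  rw [this]

theorem pvPush_len (rows cols : Int) (p : Int × Int) (V : PySem.Set (Int × Int))
    (st : List (Int × Int)) :
    ([((-1 : Int), (0 : Int)), (1, 0), (0, -1), (0, 1)].foldl
      (fun st d =>
        let n := (p.1 + d.1, p.2 + d.2)
        if (0 ≤ n.1 && n.1 < rows && 0 ≤ n.2 && n.2 < cols) &&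
            !(PySem.Set.contains V n) then n :: st else st) st).length ≤ st.length + 4 :=
  (pvPushGen rows cols p V _ st p).2


-- ---------- A side: the DFS loop computes a connected component ----------

structure pvDfsInv (grid : List (List Int)) (s : Int × Int) (V0 : PySem.Set (Int × Int))
    (st : List (Int × Int)) (visited : PySem.Set (Int × Int))
    (blob : List (Int × Int)) : Prop where
  vis_eq : ∀ q : Int × Int, q ∈ visited ↔ q ∈ V0 ∨ q ∈ blob
  vis_nodup : List.Nodup visited
  blob_nodup : List.Nodup blob
  blob_new : ∀ q ∈ blob, q ∉ V0
  blob_five : ∀ q ∈ blob, pvFive grid q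
  blob_conn : ∀ q ∈ blob, pvConn grid s q
  stack_inb : ∀ q ∈ st, pvInB grid q
  stack_conn : ∀ q ∈ st, pvFive grid q → pvConn grid s q
  closure : ∀ p ∈ blob, ∀ q : Int × Int, pvAdj p q → pvFive grid q → q ∈ visited ∨ q ∈ st
  start_mem : s ∈ visited ∨ s ∈ st

theorem pvADfs_invariant (grid : List (List Int)) (s : Int × Int) (V0 : PySem.Set (Int × Int))
    (hs5 : pvFive grid s) :
    ∀ (fuel : Nat) (st : List (Int × Int)) (visited : PySem.Set (Int × Int))
      (blob : List (Int × Int)),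
      pvDfsInv grid s V0 st visited blob →
      (∀ q ∈ visited, pvFive grid q) →
      st.length + 4 * (pvN grid - visited.length) ≤ fuel →
      pvDfsInv grid s V0 []
        (pvADfs grid (pvR grid) (pvC grid) fuel st visited blob).1
        (pvADfs grid (pvR grid) (pvC grid) fuel st visited blob).2 ∧
      (∀ q ∈ (pvADfs grid (pvR grid) (pvC grid) fuel st visited blob).1, pvFive grid q) := by
  intro fuel
  induction fuel with
  | zero =>
    intro st visited blob hinv hvf hfuel
    have hst : st = [] := List.eq_nil_of_length_eq_zero (by omega)
    subst hst
    exact ⟨hinv, hvf⟩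
  | succ fuel ih =>
    intro st visited blob hinv hvf hfuel
    cases st with
    | nil => exact ⟨hinv, hvf⟩
    | cons p stack =>
      by_cases hc : (PySem.Set.contains visited p || !(pvCell grid p == 5)) = true
      · -- the popped cell is skipped
        have hp : p ∈ visited ∨ pvCell grid p ≠ 5 := by
          simpa [PySem.Set.contains] using hc
        have hstep : pvADfs grid (pvR grid) (pvC grid) (fuel + 1) (p :: stack) visited blob
            = pvADfs grid (pvR grid) (pvC grid) fuel stack visited blob := by
          rw [pvADfs]; rw [if_pos hc]
        rw [hstep]
        apply ih
        · exact { hinv with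
            stack_inb := fun q hq => hinv.stack_inb q (List.mem_cons_of_mem _ hq)
            stack_conn := fun q hq => hinv.stack_conn q (List.mem_cons_of_mem _ hq)
            closure := by
              intro p' hp' q hadj h5
              rcases hinv.closure p' hp' q hadj h5 with h | h
              · exact Or.inl h
              · rcases List.mem_cons.mp h with rfl | h
                · rcases hp with h' | h'
                  · exact Or.inl h'
                  · exact absurd h5.2 h'
                · exact Or.inr h
            start_mem := by
              rcases hinv.start_mem with h | h
              · exact Or.inl h
              · rcases List.mem_cons.mp h with rfl | h
                · rcases hp with h' | h'
                  · exact Or.inl h'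
                  · exact absurd hs5.2 h'
                · exact Or.inr h }
        · exact hvf
        · simp only [List.length_cons] at hfuel; omega
      · -- the popped cell is visited now
        have hc' : p ∉ visited ∧ pvCell grid p = 5 := by
          simpa [PySem.Set.contains] using hc
        have hpin : pvInB grid p := hinv.stack_inb p List.mem_cons_self
        have hp5 : pvFive grid p := ⟨hpin, hc'.2⟩
        have hpconn : pvConn grid s p := hinv.stack_conn p List.mem_cons_self hp5
        have hstep : pvADfs grid (pvR grid) (pvC grid) (fuel + 1) (p :: stack) visited blob
            = pvADfs grid (pvR grid) (pvC grid) fuel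
                ([((-1 : Int), (0 : Int)), (1, 0), (0, -1), (0, 1)].foldl
                  (fun st d =>
                    let n := (p.1 + d.1, p.2 + d.2)
                    if (0 ≤ n.1 && n.1 < pvR grid && 0 ≤ n.2 && n.2 < pvC grid) &&
                        !(PySem.Set.contains (visited ++ [p]) n) then n :: st else st) stack)
                (visited ++ [p]) (blob ++ [p]) := by
          rw [pvADfs]; rw [if_neg hc]
          rw [PySem.Set.add_of_not_mem hc'.1]
        rw [hstep]
        have hmem := fun q => pvPush_mem (pvR grid) (pvC grid) p (visited ++ [p]) stack q
        have hnotin : p ∉ blob := fun h => hc'.1 ((hinv.vis_eq p).mpr (Or.inr h))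
        have hnotV0 : p ∉ V0 := fun h => hc'.1 ((hinv.vis_eq p).mpr (Or.inl h))
        have hvf' : ∀ q ∈ visited ++ [p], pvFive grid q := by
          intro q hq
          rcases List.mem_append.mp hq with h | h
          · exact hvf q h
          · rcases List.mem_singleton.mp h with rfl
            exact hp5
        have hvlen : (visited ++ [p]).length ≤ pvN grid := by
          apply pvLen_le grid _ (by
            rw [List.nodup_append]
            exact ⟨hinv.vis_nodup, List.nodup_singleton p, by
              intro a ha b hb he
              subst he
              have he2 : a = p := List.mem_singleton.mp hb
              subst he2; exact hc'.1 ha⟩)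
          intro q hq
          exact (hvf' q hq).1
        apply ih
        · exact {
            vis_eq := by
              intro q
              simp only [List.mem_append, List.mem_singleton]
              rw [hinv.vis_eq q]
              tauto
            vis_nodup := by
              rw [List.nodup_append]
              exact ⟨hinv.vis_nodup, List.nodup_singleton p, by
                intro a ha b hb he
                subst he
                have he2 : a = p := List.mem_singleton.mp hb
                subst he2; exact hc'.1 ha⟩
            blob_nodup := by
              rw [List.nodup_append]
              exact ⟨hinv.blob_nodup, List.nodup_singleton p, by
                intro a ha b hb he
                subst he
                have he2 : a = p := List.mem_singleton.mp hb
                subst he2; exact hnotin ha⟩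
            blob_new := by
              intro q hq
              rcases List.mem_append.mp hq with h | h
              · exact hinv.blob_new q h
              · rcases List.mem_singleton.mp h with rfl
                exact hnotV0
            blob_five := by
              intro q hq
              rcases List.mem_append.mp hq with h | h
              · exact hinv.blob_five q h
              · rcases List.mem_singleton.mp h with rfl
                exact hp5
            blob_conn := by
              intro q hq
              rcases List.mem_append.mp hq with h | h
              · exact hinv.blob_conn q h
              · rcases List.mem_singleton.mp h with rfl
                exact hpconn
            stack_inb := by
              intro q hq
              rcases (hmem q).mp hq with h | h
              · exact ⟨h.2.1, h.2.2.1, h.2.2.2.1, h.2.2.2.2.1⟩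
              · exact hinv.stack_inb q (List.mem_cons_of_mem _ h)
            stack_conn := by
              intro q hq h5
              rcases (hmem q).mp hq with h | h
              · exact pvConn_trans hpconn (Relation.ReflTransGen.single ⟨hp5, h5, h.1⟩)
              · exact hinv.stack_conn q (List.mem_cons_of_mem _ h) h5
            closure := by
              intro p' hp' q hadj h5
              rcases List.mem_append.mp hp' with h | h
              · rcases hinv.closure p' h q hadj h5 with h' | h'
                · exact Or.inl (List.mem_append.mpr (Or.inl h'))
                · rcases List.mem_cons.mp h' with rfl | h'
                  · exact Or.inl (List.mem_append.mpr (Or.inr (List.mem_singleton_self _)))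
                  · exact Or.inr ((hmem q).mpr (Or.inr h'))
              · rw [List.mem_singleton.mp h] at hadj
                by_cases hqv : q ∈ visited ++ [p]
                · exact Or.inl hqv
                · refine Or.inr ((hmem q).mpr (Or.inl ⟨hadj, ?_, ?_, ?_, ?_, hqv⟩)) <;>
                    first
                      | exact h5.1.1
                      | exact h5.1.2.1
                      | exact h5.1.2.2.1
                      | exact h5.1.2.2.2
            start_mem := by
              rcases hinv.start_mem with h | h
              · exact Or.inl (List.mem_append.mpr (Or.inl h))
              · rcases List.mem_cons.mp h with rfl | h
                · exact Or.inl (List.mem_append.mpr (Or.inr (List.mem_singleton_self _)))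
                · exact Or.inr ((hmem s).mpr (Or.inr h)) }
        · exact hvf'
        · have hplen := pvPush_len (pvR grid) (pvC grid) p (visited ++ [p]) stack
          have hlv : (visited ++ [p]).length = visited.length + 1 := by simp
          simp only [List.length_cons] at hfuel
          rw [hlv]
          omega

-- what one DFS call from an unvisited 5-cell s returns: old visited plus
-- exactly the connected component of s
theorem pvADfs_spec (grid : List (List Int)) (s : Int × Int) (V0 : PySem.Set (Int × Int))
    (hV0f : ∀ q ∈ V0, pvFive grid q)
    (hV0cl : ∀ p ∈ V0, ∀ q, pvStep grid p q → q ∈ V0)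
    (hV0nd : List.Nodup V0) (hs5 : pvFive grid s) (hsnew : s ∉ V0) (fuel : Nat)
    (hfuel : 1 + 4 * pvN grid ≤ fuel) :
    (∀ q, q ∈ (pvADfs grid (pvR grid) (pvC grid) fuel [s] V0 []).1 ↔
        q ∈ V0 ∨ q ∈ (pvADfs grid (pvR grid) (pvC grid) fuel [s] V0 []).2) ∧
    List.Nodup (pvADfs grid (pvR grid) (pvC grid) fuel [s] V0 []).1 ∧
    (∀ q ∈ (pvADfs grid (pvR grid) (pvC grid) fuel [s] V0 []).1, pvFive grid q) ∧
    (∀ p ∈ (pvADfs grid (pvR grid) (pvC grid) fuel [s] V0 []).1, ∀ q,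
        pvStep grid p q → q ∈ (pvADfs grid (pvR grid) (pvC grid) fuel [s] V0 []).1) ∧
    List.Nodup (pvADfs grid (pvR grid) (pvC grid) fuel [s] V0 []).2 ∧
    (∀ q ∈ (pvADfs grid (pvR grid) (pvC grid) fuel [s] V0 []).2, q ∉ V0) ∧
    (∀ q, q ∈ (pvADfs grid (pvR grid) (pvC grid) fuel [s] V0 []).2 ↔ pvConn grid s q) := by
  have hinit : pvDfsInv grid s V0 [s] V0 [] := {
    vis_eq := by simp
    vis_nodup := hV0nd
    blob_nodup := List.nodup_nil
    blob_new := by simp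
    blob_five := by simp
    blob_conn := by simp
    stack_inb := by
      intro q hq
      rw [List.mem_singleton.mp hq]
      exact hs5.1
    stack_conn := by
      intro q hq _
      rw [List.mem_singleton.mp hq]
      exact Relation.ReflTransGen.refl
    closure := by simp
    start_mem := Or.inr (List.mem_singleton_self _) }
  have hV0len : V0.length ≤ pvN grid :=
    pvLen_le grid V0 hV0nd (fun q hq => (hV0f q hq).1)
  obtain ⟨hinv, hvf⟩ := pvADfs_invariant grid s V0 hs5 fuel [s] V0 [] hinit hV0f (by
    simp only [List.length_singleton]
    omega)
  set r := pvADfs grid (pvR grid) (pvC grid) fuel [s] V0 [] with hr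
  have hsB : s ∈ r.2 := by
    rcases hinv.start_mem with h | h
    · rcases (hinv.vis_eq s).mp h with h' | h'
      · exact absurd h' hsnew
      · exact h'
    · exact absurd h (List.not_mem_nil)
  have hclosed : ∀ p ∈ r.1, ∀ q, pvStep grid p q → q ∈ r.1 := by
    intro p hp q hstep
    rcases (hinv.vis_eq p).mp hp with h | h
    · exact (hinv.vis_eq q).mpr (Or.inl (hV0cl p h q hstep))
    · rcases hinv.closure p h q hstep.2.2 hstep.2.1 with h' | h'
      · exact h'
      · exact absurd h' (List.not_mem_nil)
  refine ⟨hinv.vis_eq, hinv.vis_nodup, hvf, hclosed, hinv.blob_nodup, hinv.blob_new, ?_⟩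
  intro q
  constructor
  · exact hinv.blob_conn q
  · intro hconn
    induction hconn with
    | refl => exact hsB
    | tail hc hstep ih =>
      rename_i b c
      have hcV : c ∈ r.1 := by
        rcases hinv.closure b ih c hstep.2.2 hstep.2.1 with h' | h'
        · exact h'
        · exact absurd h' (List.not_mem_nil)
      rcases (hinv.vis_eq c).mp hcV with h' | h'
      · exfalso
        exact hinv.blob_new b ih (hV0cl c h' b (pvStep_symm hstep))
      · exact h'

-- ---------- A side: the row-major scan collects all components ----------

theorem pvFoldl_flatMap {α β σ : Type} (xs : List α) (f : α → List β) (g : σ → β → σ)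
    (init : σ) :
    (xs.flatMap f).foldl g init = xs.foldl (fun a x => (f x).foldl g a) init := by
  induction xs generalizing init with
  | nil => rfl
  | cons h t ih => rw [List.flatMap_cons, List.foldl_append, List.foldl_cons, ih]

def pvPos (grid : List (List Int)) : List (Int × Int) :=
  (PySem.List.pyRange 0 (pvR grid) 1).flatMap
    (fun r => (PySem.List.pyRange 0 (pvC grid) 1).map (fun c => (r, c)))

theorem pvPos_mem (grid : List (List Int)) (q : Int × Int) :
    q ∈ pvPos grid ↔ pvInB grid q := by
  obtain ⟨q1, q2⟩ := q
  simp [pvPos, List.mem_flatMap, PySem.List.mem_pyRange_one, pvInB, Prod.ext_iff]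
  tauto

theorem pvFlat_nodup (cs : List Int) (hcs : cs.Nodup) :
    ∀ rs : List Int, rs.Nodup →
      (rs.flatMap (fun r => cs.map (fun c => ((r : Int), c)))).Nodup := by
  intro rs
  induction rs with
  | nil => intro _; simp
  | cons r rs ih =>
    intro h
    rw [List.flatMap_cons, List.nodup_append]
    refine ⟨hcs.map (fun c c' hcc => by simpa using congrArg Prod.snd hcc), ih (List.Nodup.of_cons h), ?_⟩
    intro a ha b hb he
    subst he
    rcases List.mem_map.mp ha with ⟨c, _, rfl⟩
    rcases List.mem_flatMap.mp hb with ⟨r', hr', hmem⟩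
    rcases List.mem_map.mp hmem with ⟨c', _, he2⟩
    have : r' = r := congrArg Prod.fst he2
    subst this
    exact (List.nodup_cons.mp h).1 hr'

theorem pvPos_nodup (grid : List (List Int)) : (pvPos grid).Nodup :=
  pvFlat_nodup _ (PySem.List.nodup_pyRange_one 0 (pvC grid)) _
    (PySem.List.nodup_pyRange_one 0 (pvR grid))

def pvAStep (grid : List (List Int)) (fuel : Nat)
    (acc : PySem.Set (Int × Int) × List (List (Int × Int))) (p : Int × Int) :
    PySem.Set (Int × Int) × List (List (Int × Int)) :=
  if pvCell grid p == 5 && !(PySem.Set.contains acc.1 p) then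
    ((pvADfs grid (pvR grid) (pvC grid) fuel [p] acc.1 []).1,
      acc.2 ++ [(pvADfs grid (pvR grid) (pvC grid) fuel [p] acc.1 []).2])
  else acc

theorem pvAScan_eq (grid : List (List Int)) (fuel : Nat) :
    pvAScan grid (pvR grid) (pvC grid) fuel =
      (pvPos grid).foldl (pvAStep grid fuel) ([], []) := by
  unfold pvAScan pvPos pvAStep
  rw [pvFoldl_flatMap]
  simp only [List.foldl_map]

structure pvScanInv (grid : List (List Int))
    (acc : PySem.Set (Int × Int) × List (List (Int × Int))) : Prop where
  v_five : ∀ q ∈ acc.1, pvFive grid q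
  v_nodup : List.Nodup acc.1
  v_closed : ∀ p ∈ acc.1, ∀ q, pvStep grid p q → q ∈ acc.1
  covered : ∀ q : Int × Int, q ∈ acc.1 ↔ ∃ b ∈ acc.2, q ∈ b
  blob_good : ∀ b ∈ acc.2, List.Nodup b ∧ ∃ s, ∀ q, q ∈ b ↔ pvConn grid s q
  disj : List.Pairwise (fun b1 b2 => ∀ q, q ∈ b1 → q ∉ b2) acc.2

theorem pvScan_go (grid : List (List Int)) (fuel : Nat) (hfuel : 1 + 4 * pvN grid ≤ fuel) :
    ∀ (L : List (Int × Int)) (acc : PySem.Set (Int × Int) × List (List (Int × Int))),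
      (∀ p ∈ L, pvInB grid p) →
      pvScanInv grid acc →
      pvScanInv grid (L.foldl (pvAStep grid fuel) acc) ∧
      (∀ q ∈ acc.1, q ∈ (L.foldl (pvAStep grid fuel) acc).1) ∧
      (∀ q, pvFive grid q → (q ∈ acc.1 ∨ q ∈ L) →
        q ∈ (L.foldl (pvAStep grid fuel) acc).1) := by
  intro L
  induction L with
  | nil =>
    intro acc _ hinv
    refine ⟨hinv, fun q h => h, ?_⟩
    rintro q h5 (h | h)
    · exact h
    · cases h
  | cons p L ih =>
    intro acc hb hinv
    simp only [List.foldl_cons]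
    by_cases hcond : (pvCell grid p == 5 && !(PySem.Set.contains acc.1 p)) = true
    · have hc' : pvCell grid p = 5 ∧ p ∉ acc.1 := by
        simpa [PySem.Set.contains] using hcond
      have hp5 : pvFive grid p := ⟨hb p List.mem_cons_self, hc'.1⟩
      have hspec := pvADfs_spec grid p acc.1 hinv.v_five hinv.v_closed hinv.v_nodup hp5
        hc'.2 fuel hfuel
      obtain ⟨hviseq, hvnd, hvf, hvcl, hbnd, hbnew, hbconn⟩ := hspec
      have hstep : pvAStep grid fuel acc p =
          ((pvADfs grid (pvR grid) (pvC grid) fuel [p] acc.1 []).1,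
            acc.2 ++ [(pvADfs grid (pvR grid) (pvC grid) fuel [p] acc.1 []).2]) := by
        unfold pvAStep
        rw [if_pos hcond]
      rw [hstep]
      have hpB : p ∈ (pvADfs grid (pvR grid) (pvC grid) fuel [p] acc.1 []).2 :=
        (hbconn p).mpr Relation.ReflTransGen.refl
      have hinv' : pvScanInv grid
          ((pvADfs grid (pvR grid) (pvC grid) fuel [p] acc.1 []).1,
            acc.2 ++ [(pvADfs grid (pvR grid) (pvC grid) fuel [p] acc.1 []).2]) := {
        v_five := hvf
        v_nodup := hvnd
        v_closed := hvcl
        covered := by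
          intro q
          rw [hviseq q, hinv.covered q]
          simp only [List.mem_append, List.mem_singleton]
          constructor
          · rintro (⟨b, hb', hq⟩ | hq)
            · exact ⟨b, Or.inl hb', hq⟩
            · exact ⟨_, Or.inr rfl, hq⟩
          · rintro ⟨b, hb' | hb', hq⟩
            · exact Or.inl ⟨b, hb', hq⟩
            · subst hb'; exact Or.inr hq
        blob_good := by
          intro b hb'
          rcases List.mem_append.mp hb' with h | h
          · exact hinv.blob_good b h
          · rw [List.mem_singleton.mp h]
            exact ⟨hbnd, p, hbconn⟩
        disj := by
          rw [List.pairwise_append]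
          refine ⟨hinv.disj, List.pairwise_singleton _ _, ?_⟩
          intro b hb' b' hb'' q hq
          rw [List.mem_singleton.mp hb'']
          intro hqB
          exact hbnew q hqB ((hinv.covered q).mpr ⟨b, hb', hq⟩) }
      obtain ⟨hI, hM, hC⟩ := ih _ (fun q hq => hb q (List.mem_cons_of_mem _ hq)) hinv'
      refine ⟨hI, ?_, ?_⟩
      · intro q hq
        exact hM q ((hviseq q).mpr (Or.inl hq))
      · rintro q h5 (hq | hq)
        · exact hM q ((hviseq q).mpr (Or.inl hq))
        · rcases List.mem_cons.mp hq with rfl | hq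
          · exact hM q ((hviseq q).mpr (Or.inr hpB))
          · exact hC q h5 (Or.inr hq)
    · have hstep : pvAStep grid fuel acc p = acc := by
        unfold pvAStep
        rw [if_neg hcond]
      rw [hstep]
      have hc' : pvCell grid p ≠ 5 ∨ p ∈ acc.1 := by
        by_contra hn
        rw [not_or, Classical.not_not] at hn
        exact hcond (by simp [PySem.Set.contains, hn.1, hn.2])
      obtain ⟨hI, hM, hC⟩ := ih acc (fun q hq => hb q (List.mem_cons_of_mem _ hq)) hinv
      refine ⟨hI, hM, ?_⟩
      rintro q h5 (hq | hq)
      · exact hC q h5 (Or.inl hq)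
      · rcases List.mem_cons.mp hq with rfl | hq
        · rcases hc' with h | h
          · exact absurd h5.2 h
          · exact hC q h5 (Or.inl h)
        · exact hC q h5 (Or.inr hq)

-- the A scan with the fuel used by the port
theorem pvA_scan_spec (grid : List (List Int)) :
    pvScanInv grid (pvAScan grid (pvR grid) (pvC grid)
      (5 * grid.length * (PySem.List.pyGetD grid 0 []).length + 5)) ∧
    (∀ q, pvFive grid q ↔ q ∈ (pvAScan grid (pvR grid) (pvC grid)
      (5 * grid.length * (PySem.List.pyGetD grid 0 []).length + 5)).1) := by
  have hfuel : 1 + 4 * pvN grid ≤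
      5 * grid.length * (PySem.List.pyGetD grid 0 []).length + 5 := by
    have h : 5 * grid.length * (PySem.List.pyGetD grid 0 []).length = 5 * pvN grid := by
      rw [pvN, Nat.mul_assoc]
    omega
  have hinit : pvScanInv grid (([], []) :
      PySem.Set (Int × Int) × List (List (Int × Int))) := {
    v_five := by simp
    v_nodup := List.nodup_nil
    v_closed := by simp
    covered := by simp
    blob_good := by simp
    disj := List.Pairwise.nil }
  obtain ⟨hI, _, hC⟩ := pvScan_go grid _ hfuel (pvPos grid) ([], [])
    (fun p hp => (pvPos_mem grid p).mp hp) hinit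
  rw [pvAScan_eq]
  refine ⟨hI, fun q => ⟨?_, fun h => hI.v_five q h⟩⟩
  intro h5
  exact hC q h5 (Or.inr ((pvPos_mem grid q).mpr h5.1))

-- ---------- B side: the label dict ----------

def pvF (grid : List (List Int)) : List (Int × Int) :=
  (pvPos grid).filter (fun p => pvCell grid p == 5)

theorem pvF_mem (grid : List (List Int)) (p : Int × Int) :
    p ∈ pvF grid ↔ pvFive grid p := by
  simp [pvF, List.mem_filter, pvPos_mem, pvFive]

theorem pvF_nodup (grid : List (List Int)) : (pvF grid).Nodup :=
  (pvPos_nodup grid).filter _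

-- rewriting every value of an association list, keys unchanged
theorem pvDict_get?_mapValues (items : List ((Int × Int) × (Int × Int)))
    (g : Int × Int → Int × Int) (k : Int × Int) :
    (PySem.Dict.mk (items.map (fun kv => (kv.1, g kv.2)))).get? k =
      ((PySem.Dict.mk items).get? k).map g := by
  induction items with
  | nil => rfl
  | cons kv items ih =>
    simp only [List.map_cons, PySem.Dict.get?, List.find?]
    by_cases h : (kv.1 == k) = true
    · simp [h]
    · simp only [h]
      simpa [PySem.Dict.get?] using ih

-- the first loop of B: a dict mapping every 5-cell to itself, in scan order
theorem pvLabel0_items (grid : List (List Int)) :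
    ∀ (L : List (Int × Int)), L.Nodup →
      ∀ d : PySem.Dict (Int × Int) (Int × Int), (∀ p ∈ L, d.contains p = false) →
      (L.foldl (fun d p => if pvCell grid p == 5 then d.insert p p else d) d).items =
        d.items ++ (L.filter (fun p => pvCell grid p == 5)).map (fun p => (p, p)) := by
  intro L
  induction L with
  | nil => intro _ d _; simp
  | cons p L ih =>
    intro hnd d hfresh
    simp only [List.foldl_cons, List.filter_cons]
    by_cases h5 : (pvCell grid p == 5) = true
    · rw [if_pos h5, if_pos h5]
      rw [ih (List.Nodup.of_cons hnd) _ (by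
        intro q hq
        rw [PySem.Dict.contains_insert]
        have hne : (q == p) = false := by
          simp only [beq_eq_false_iff_ne, ne_eq]
          intro he
          subst he
          exact (List.nodup_cons.mp hnd).1 hq
        rw [hne, hfresh q (List.mem_cons_of_mem _ hq)]
        rfl)]
      rw [PySem.Dict.items_insert_of_not_contains _ _ (hfresh p List.mem_cons_self)]
      simp
    · rw [if_neg h5, if_neg h5]
      exact ih (List.Nodup.of_cons hnd) d (fun q hq => hfresh q (List.mem_cons_of_mem _ hq))

-- B's merge step at one scan position, as a named function
def pvBStep (_grid : List (List Int)) (d : PySem.Dict (Int × Int) (Int × Int))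
    (p : Int × Int) : PySem.Dict (Int × Int) (Int × Int) :=
  if d.contains p then
    ([(p.1, p.2 + 1), (p.1 + 1, p.2)] : List (Int × Int)).foldl (fun d q =>
      if d.contains q && !(d.getD q p == d.getD p p) then
        PySem.Dict.mk (d.items.map (fun kv =>
          if kv.2 == d.getD q p then (kv.1, d.getD p p) else kv))
      else d) d
  else d
-- ---------- B side: the merge loop computes connectivity classes ----------

def pvCoarsen (d d' : PySem.Dict (Int × Int) (Int × Int)) : Prop :=
  ∀ x y : Int × Int, d.get? x = d.get? y → d'.get? x = d'.get? y

structure pvLabInv (grid : List (List Int))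
    (d : PySem.Dict (Int × Int) (Int × Int)) : Prop where
  keys : d.items.map Prod.fst = pvF grid
  sound : ∀ p ∈ pvF grid, ∀ q ∈ pvF grid, d.get? p = d.get? q → pvConn grid p q

theorem pvLab_contains (grid : List (List Int)) (d : PySem.Dict (Int × Int) (Int × Int))
    (hk : d.items.map Prod.fst = pvF grid) (p : Int × Int) :
    d.contains p = true ↔ p ∈ pvF grid := by
  rw [← hk]
  simp [PySem.Dict.contains, List.any_eq_true, List.mem_map]

theorem pvContains_get? (d : PySem.Dict (Int × Int) (Int × Int)) (p : Int × Int)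
    (h : d.contains p = true) : ∃ v, d.get? p = some v := by
  have h2 : (d.items.find? (fun kv => kv.1 == p)).isSome := by
    rw [List.find?_isSome]
    exact List.any_eq_true.mp h
  cases hf : d.items.find? (fun kv => kv.1 == p) with
  | none => rw [hf] at h2; simp at h2
  | some kv => exact ⟨kv.2, by simp only [PySem.Dict.get?, hf]; rfl⟩

theorem pvGet?_eq_some_getD (d : PySem.Dict (Int × Int) (Int × Int)) (p : Int × Int)
    (h : d.contains p = true) (dflt : Int × Int) : d.get? p = some (d.getD p dflt) := by
  obtain ⟨v, hv⟩ := pvContains_get? d p h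
  rw [PySem.Dict.getD, hv]
  rfl

-- relabeling one class: every value equal to `old` becomes `new`
theorem pvRelabel_get? (d : PySem.Dict (Int × Int) (Int × Int)) (old new k : Int × Int) :
    (PySem.Dict.mk (d.items.map (fun kv =>
        if kv.2 == old then (kv.1, new) else kv))).get? k =
      (d.get? k).map (fun v => if v == old then new else v) := by
  rw [List.map_congr_left (l := d.items)
    (f := fun kv => if kv.2 == old then (kv.1, new) else kv)
    (g := fun kv => (kv.1, if kv.2 == old then new else kv.2))
    (fun kv _ => by obtain ⟨k, v⟩ := kv; by_cases h : v = old <;> simp [h])]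
  exact pvDict_get?_mapValues d.items (fun v => if v == old then new else v) k

theorem pvRelabel_keys (items : List ((Int × Int) × (Int × Int))) (old new : Int × Int) :
    (items.map (fun kv => if kv.2 == old then (kv.1, new) else kv)).map Prod.fst =
      items.map Prod.fst := by
  rw [List.map_map]
  refine List.map_congr_left (fun kv _ => ?_)
  obtain ⟨k, v⟩ := kv
  by_cases h : v = old <;> simp [h]

def pvBMerge (p : Int × Int) (d : PySem.Dict (Int × Int) (Int × Int)) (q : Int × Int) :
    PySem.Dict (Int × Int) (Int × Int) :=
  if d.contains q && !(d.getD q p == d.getD p p) then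
    PySem.Dict.mk (d.items.map (fun kv =>
      if kv.2 == d.getD q p then (kv.1, d.getD p p) else kv))
  else d

theorem pvBStep_eq (grid : List (List Int)) (d : PySem.Dict (Int × Int) (Int × Int))
    (p : Int × Int) :
    pvBStep grid d p =
      if d.contains p then
        ([(p.1, p.2 + 1), (p.1 + 1, p.2)] : List (Int × Int)).foldl (pvBMerge p) d
      else d := rfl

theorem pvBMerge_spec (grid : List (List Int)) (p q : Int × Int)
    (d : PySem.Dict (Int × Int) (Int × Int)) (hinv : pvLabInv grid d)
    (hp : p ∈ pvF grid) (hadj : pvAdj p q) :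
    pvLabInv grid (pvBMerge p d q) ∧ pvCoarsen d (pvBMerge p d q) ∧
      (q ∈ pvF grid → (pvBMerge p d q).get? p = (pvBMerge p d q).get? q) := by
  by_cases hc : (d.contains q && !(d.getD q p == d.getD p p)) = true
  · have hd' : pvBMerge p d q = PySem.Dict.mk (d.items.map (fun kv =>
        if kv.2 == d.getD q p then (kv.1, d.getD p p) else kv)) := by
      unfold pvBMerge
      rw [if_pos hc]
    have hcq : d.contains q = true := by
      have h12 := hc
      simp only [Bool.and_eq_true] at h12
      exact h12.1
    have hq : q ∈ pvF grid := (pvLab_contains grid d hinv.keys q).mp hcq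
    have hne : d.getD q p ≠ d.getD p p := by
      have h12 := hc
      simp only [Bool.and_eq_true] at h12
      simpa using h12.2
    have hget : ∀ k, (pvBMerge p d q).get? k =
        (d.get? k).map (fun v => if v == d.getD q p then d.getD p p else v) := by
      intro k
      rw [hd']
      exact pvRelabel_get? d _ _ k
    have hgq : d.get? q = some (d.getD q p) :=
      pvGet?_eq_some_getD d q hcq p
    have hgp : d.get? p = some (d.getD p p) :=
      pvGet?_eq_some_getD d p ((pvLab_contains grid d hinv.keys p).mpr hp) p
    have hconnpq : pvConn grid p q :=
      Relation.ReflTransGen.single ⟨(pvF_mem grid p).mp hp, (pvF_mem grid q).mp hq, hadj⟩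
    refine ⟨⟨?_, ?_⟩, ?_, ?_⟩
    · rw [hd']
      simp only
      rw [pvRelabel_keys]
      exact hinv.keys
    · -- soundness after the relabel
      intro x hx y hy hxy
      rw [hget x, hget y] at hxy
      obtain ⟨vx, hvx⟩ := pvContains_get? d x ((pvLab_contains grid d hinv.keys x).mpr hx)
      obtain ⟨vy, hvy⟩ := pvContains_get? d y ((pvLab_contains grid d hinv.keys y).mpr hy)
      rw [hvx, hvy] at hxy
      simp only [Option.map_some, Option.some.injEq] at hxy
      by_cases hbx : (vx == d.getD q p) = true <;> by_cases hby : (vy == d.getD q p) = true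
      · -- both in the merged class: both equal to q's old label
        have hx' : pvConn grid x q := hinv.sound x hx q hq (by
          rw [hvx, hgq, (beq_iff_eq).mp hbx])
        have hy' : pvConn grid y q := hinv.sound y hy q hq (by
          rw [hvy, hgq, (beq_iff_eq).mp hby])
        exact pvConn_trans hx' (pvConn_symm hy')
      · -- x relabeled to p's label, y already has it
        rw [if_pos hbx, if_neg hby] at hxy
        have hx' : pvConn grid x q := hinv.sound x hx q hq (by
          rw [hvx, hgq, (beq_iff_eq).mp hbx])
        have hy' : pvConn grid y p := hinv.sound y hy p hp (by
          rw [hvy, hgp, hxy])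
        exact pvConn_trans hx' (pvConn_trans (pvConn_symm hconnpq) (pvConn_symm hy'))
      · rw [if_neg hbx, if_pos hby] at hxy
        have hy' : pvConn grid y q := hinv.sound y hy q hq (by
          rw [hvy, hgq, (beq_iff_eq).mp hby])
        have hx' : pvConn grid x p := hinv.sound x hx p hp (by
          rw [hvx, hgp, ← hxy])
        exact pvConn_trans hx' (pvConn_trans hconnpq (pvConn_symm hy'))
      · rw [if_neg hbx, if_neg hby] at hxy
        subst hxy
        exact hinv.sound x hx y hy (by rw [hvx, hvy])
    · intro x y hxy
      rw [hget x, hget y, hxy]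
    · intro _
      rw [hget p, hget q, hgp, hgq]
      simp only [Option.map_some]
      rw [if_neg (by simpa using fun h => hne h.symm), if_pos (by simp)]
  · have hd' : pvBMerge p d q = d := by
      unfold pvBMerge
      rw [if_neg hc]
    rw [hd']
    refine ⟨hinv, fun x y h => h, ?_⟩
    intro hq
    have hcq : d.contains q = true := (pvLab_contains grid d hinv.keys q).mpr hq
    have heq : d.getD q p = d.getD p p := by
      by_contra hne
      exact hc (by simp [hcq, hne])
    rw [pvGet?_eq_some_getD d p ((pvLab_contains grid d hinv.keys p).mpr hp) p,
      pvGet?_eq_some_getD d q hcq p, heq]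

theorem pvBStep_spec (grid : List (List Int)) (p : Int × Int)
    (d : PySem.Dict (Int × Int) (Int × Int)) (hinv : pvLabInv grid d) :
    pvLabInv grid (pvBStep grid d p) ∧ pvCoarsen d (pvBStep grid d p) ∧
      (p ∈ pvF grid → ∀ q ∈ ([(p.1, p.2 + 1), (p.1 + 1, p.2)] : List (Int × Int)),
        q ∈ pvF grid → (pvBStep grid d p).get? p = (pvBStep grid d p).get? q) := by
  rw [pvBStep_eq]
  by_cases hcp : d.contains p = true
  · rw [if_pos hcp]
    have hp : p ∈ pvF grid := (pvLab_contains grid d hinv.keys p).mp hcp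
    have hadj1 : pvAdj p (p.1, p.2 + 1) := by unfold pvAdj; simp
    have hadj2 : pvAdj p (p.1 + 1, p.2) := by unfold pvAdj; simp
    simp only [List.foldl_cons, List.foldl_nil]
    obtain ⟨hinv1, hco1, heq1⟩ := pvBMerge_spec grid p (p.1, p.2 + 1) d hinv hp hadj1
    obtain ⟨hinv2, hco2, heq2⟩ :=
      pvBMerge_spec grid p (p.1 + 1, p.2) (pvBMerge p d (p.1, p.2 + 1)) hinv1 hp hadj2
    refine ⟨hinv2, fun x y h => hco2 x y (hco1 x y h), ?_⟩
    intro _ q hq hqF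
    rcases List.mem_cons.mp hq with rfl | hq
    · exact hco2 _ _ (heq1 hqF)
    · have hq' := List.mem_singleton.mp hq
      subst hq'
      exact heq2 hqF
  · rw [if_neg hcp]
    refine ⟨hinv, fun x y h => h, ?_⟩
    intro hp
    exact absurd ((pvLab_contains grid d hinv.keys p).mpr hp) hcp

theorem pvBFold_spec (grid : List (List Int)) :
    ∀ (L : List (Int × Int)) (d : PySem.Dict (Int × Int) (Int × Int)),
      pvLabInv grid d →
      pvLabInv grid (L.foldl (pvBStep grid) d) ∧
      pvCoarsen d (L.foldl (pvBStep grid) d) ∧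
      (∀ p ∈ L, p ∈ pvF grid → ∀ q ∈ ([(p.1, p.2 + 1), (p.1 + 1, p.2)] : List (Int × Int)),
        q ∈ pvF grid →
        (L.foldl (pvBStep grid) d).get? p = (L.foldl (pvBStep grid) d).get? q) := by
  intro L
  induction L with
  | nil =>
    intro d hinv
    exact ⟨hinv, fun x y h => h, by simp⟩
  | cons p L ih =>
    intro d hinv
    simp only [List.foldl_cons]
    obtain ⟨hinv1, hco1, heq1⟩ := pvBStep_spec grid p d hinv
    obtain ⟨hinvF, hcoF, heqF⟩ := ih _ hinv1
    refine ⟨hinvF, fun x y h => hcoF x y (hco1 x y h), ?_⟩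
    intro p' hp' hpF q hq hqF
    rcases List.mem_cons.mp hp' with rfl | hp'
    · exact hcoF _ _ (heq1 hpF q hq hqF)
    · exact heqF p' hp' hpF q hq hqF

-- after the whole scan, equal labels are exactly connectivity
theorem pvLab_final (grid : List (List Int)) (d0 : PySem.Dict (Int × Int) (Int × Int))
    (hinv0 : pvLabInv grid d0) :
    pvLabInv grid ((pvPos grid).foldl (pvBStep grid) d0) ∧
    (∀ p ∈ pvF grid, ∀ q ∈ pvF grid,
      (((pvPos grid).foldl (pvBStep grid) d0).get? p =
        ((pvPos grid).foldl (pvBStep grid) d0).get? q ↔ pvConn grid p q)) := by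
  obtain ⟨hinv, _, hedge⟩ := pvBFold_spec grid (pvPos grid) d0 hinv0
  have hstep : ∀ b c : Int × Int, pvStep grid b c →
      ((pvPos grid).foldl (pvBStep grid) d0).get? b =
        ((pvPos grid).foldl (pvBStep grid) d0).get? c := by
    intro b c hs
    obtain ⟨h5b, h5c, hadj⟩ := hs
    have hbP : b ∈ pvPos grid := (pvPos_mem grid b).mpr h5b.1
    have hcP : c ∈ pvPos grid := (pvPos_mem grid c).mpr h5c.1
    have hbF : b ∈ pvF grid := (pvF_mem grid b).mpr h5b
    have hcF : c ∈ pvF grid := (pvF_mem grid c).mpr h5c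
    obtain ⟨b1, b2⟩ := b
    obtain ⟨c1, c2⟩ := c
    unfold pvAdj at hadj
    rcases hadj with ⟨h1, h2⟩ | ⟨h1, h2⟩ | ⟨h1, h2⟩ | ⟨h1, h2⟩
    · -- c is above b: b = (c1 + 1, c2)
      have he : (b1, b2) = (c1 + 1, c2) := by simp [Prod.ext_iff]; omega
      rw [he]
      exact (hedge (c1, c2) hcP hcF (c1 + 1, c2) (by simp) (he ▸ hbF)).symm
    · have he : (c1, c2) = (b1 + 1, b2) := by simp [Prod.ext_iff]; omega
      rw [he]
      exact hedge (b1, b2) hbP hbF (b1 + 1, b2) (by simp) (he ▸ hcF)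
    · have he : (b1, b2) = (c1, c2 + 1) := by simp [Prod.ext_iff]; omega
      rw [he]
      exact (hedge (c1, c2) hcP hcF (c1, c2 + 1) (by simp) (he ▸ hbF)).symm
    · have he : (c1, c2) = (b1, b2 + 1) := by simp [Prod.ext_iff]; omega
      rw [he]
      exact hedge (b1, b2) hbP hbF (b1, b2 + 1) (by simp) (he ▸ hcF)
  refine ⟨hinv, fun p hp q hq => ⟨hinv.sound p hp q hq, ?_⟩⟩
  intro hconn
  induction hconn with
  | refl => rfl
  | tail hc hs ih2 =>
    rename_i b c
    exact (ih2 ((pvF_mem grid b).mpr hs.1)).trans (hstep b c hs)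

-- ---------- B side: initial dict, flattened loops, class sizes ----------

theorem pvSelf_get? (F : List (Int × Int)) (k : Int × Int) :
    (PySem.Dict.mk (F.map (fun p => (p, p)))).get? k = if k ∈ F then some k else none := by
  induction F with
  | nil => rfl
  | cons p F ih =>
    simp only [List.map_cons, PySem.Dict.get?, List.find?]
    by_cases h : p = k
    · subst h
      simp
    · have hb : ((p, p).1 == k) = false := by simpa using h
      rw [hb]
      simp only [List.mem_cons]
      rw [if_congr (iff_of_eq (congrArg _ rfl)) rfl rfl]
      have : (k = p ∨ k ∈ F) ↔ k ∈ F := by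
        constructor
        · rintro (rfl | hk)
          · exact absurd rfl h
          · exact hk
        · exact Or.inr
      rw [if_congr this rfl rfl]
      simpa [PySem.Dict.get?] using ih

theorem pvLabel0_eq (grid : List (List Int)) :
    ((PySem.List.pyRange 0 (pvR grid) 1).foldl (fun d r =>
        (PySem.List.pyRange 0 (pvC grid) 1).foldl (fun d c =>
          if PySem.List.pyGetD (PySem.List.pyGetD grid r []) c 0 == 5 then
            d.insert (r, c) (r, c)
          else d) d) (PySem.Dict.mk [])) =
      PySem.Dict.mk ((pvF grid).map (fun p => (p, p))) := by
  have h1 : ((PySem.List.pyRange 0 (pvR grid) 1).foldl (fun d r =>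
        (PySem.List.pyRange 0 (pvC grid) 1).foldl (fun d c =>
          if PySem.List.pyGetD (PySem.List.pyGetD grid r []) c 0 == 5 then
            d.insert (r, c) (r, c)
          else d) d) (PySem.Dict.mk [])) =
      (pvPos grid).foldl (fun d p => if pvCell grid p == 5 then d.insert p p else d)
        (PySem.Dict.mk []) := by
    unfold pvPos
    rw [pvFoldl_flatMap]
    simp only [List.foldl_map]
    rfl
  rw [h1]
  apply PySem.Dict.ext
  rw [pvLabel0_items grid (pvPos grid) (pvPos_nodup grid) (PySem.Dict.mk [])
    (fun p _ => rfl)]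
  simp [pvF]

theorem pvLabInv0 (grid : List (List Int)) :
    pvLabInv grid (PySem.Dict.mk ((pvF grid).map (fun p => (p, p)))) := by
  refine ⟨by simp [Function.comp_def], ?_⟩
  intro p hp q hq h
  rw [pvSelf_get? _ p, pvSelf_get? _ q, if_pos hp, if_pos hq] at h
  rw [Option.some_inj.mp h]
  exact Relation.ReflTransGen.refl

def pvBLabel (grid : List (List Int)) : PySem.Dict (Int × Int) (Int × Int) :=
  (pvPos grid).foldl (pvBStep grid) (PySem.Dict.mk ((pvF grid).map (fun p => (p, p))))

theorem pvBMergeFold_eq (grid : List (List Int))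
    (d0 : PySem.Dict (Int × Int) (Int × Int)) :
    ((PySem.List.pyRange 0 (pvR grid) 1).foldl (fun d r =>
        (PySem.List.pyRange 0 (pvC grid) 1).foldl (fun d c =>
          if d.contains (r, c) then
            ([(r, c + 1), (r + 1, c)] : List (Int × Int)).foldl (fun d q =>
              if d.contains q && !(d.getD q (r, c) == d.getD (r, c) (r, c)) then
                PySem.Dict.mk (d.items.map (fun kv =>
                  if kv.2 == d.getD q (r, c) then (kv.1, d.getD (r, c) (r, c))
                  else kv))
              else d) d
          else d) d) d0) =
      (pvPos grid).foldl (pvBStep grid) d0 := by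
  unfold pvPos pvBStep
  rw [pvFoldl_flatMap]
  simp only [List.foldl_map]

theorem pvBLabel_spec (grid : List (List Int)) :
    (pvBLabel grid).items.map Prod.fst = pvF grid ∧
    (∀ p ∈ pvF grid, ∀ q ∈ pvF grid,
      ((pvBLabel grid).get? p = (pvBLabel grid).get? q ↔ pvConn grid p q)) := by
  obtain ⟨hinv, hiff⟩ := pvLab_final grid _ (pvLabInv0 grid)
  exact ⟨hinv.keys, hiff⟩

-- counting occurrences of a value among the values of a map over a list
theorem pvCount_map (F : List (Int × Int)) (f : Int × Int → Int × Int) (v : Int × Int) :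
    (F.map f).count v = (F.filter (fun k => f k == v)).length := by
  induction F with
  | nil => rfl
  | cons p F ih =>
    simp only [List.map_cons, List.count_cons, List.filter_cons, ih]
    by_cases h : f p = v
    · simp [h]
    · have h2 : (f p == v) = false := by simpa using h
      rw [h2]
      simp

theorem pvConn_five_right (grid : List (List Int)) (s q : Int × Int)
    (h5 : pvFive grid s) (h : pvConn grid s q) : pvFive grid q := by
  induction h with
  | refl => exact h5
  | tail _ hs _ => exact hs.2.1

-- the size of a component equals how often its label occurs among all labels
theorem pvClass_count (grid : List (List Int)) (b : List (Int × Int))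
    (hbnd : b.Nodup) (s : Int × Int) (hsF : s ∈ pvF grid)
    (hbs : ∀ x, x ∈ b ↔ pvConn grid s x) :
    ((pvBLabel grid).values.count ((pvBLabel grid).getD s (0, 0))) = b.length := by
  obtain ⟨hkeys, hiff⟩ := pvBLabel_spec grid
  have hknd : (pvBLabel grid).keys.Nodup := by
    show ((pvBLabel grid).items.map Prod.fst).Nodup
    rw [hkeys]
    exact pvF_nodup grid
  have hvals : (pvBLabel grid).values =
      (pvBLabel grid).keys.map (fun k => (pvBLabel grid).getD k (0, 0)) :=
    PySem.Dict.values_eq_map_keys _ hknd (0, 0)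
  have hkeq : (pvBLabel grid).keys = pvF grid := hkeys
  rw [hvals, hkeq, pvCount_map]
  apply List.Perm.length_eq
  apply (List.perm_ext_iff_of_nodup ((pvF_nodup grid).filter _) hbnd).mpr
  intro x
  rw [List.mem_filter, hbs x]
  constructor
  · rintro ⟨hxF, hx⟩
    have hxeq : (pvBLabel grid).getD x (0, 0) = (pvBLabel grid).getD s (0, 0) :=
      beq_iff_eq.mp hx
    have hget : (pvBLabel grid).get? x = (pvBLabel grid).get? s := by
      rw [pvGet?_eq_some_getD _ x ((pvLab_contains grid _ hkeys x).mpr hxF) (0, 0),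
        pvGet?_eq_some_getD _ s ((pvLab_contains grid _ hkeys s).mpr hsF) (0, 0), hxeq]
    exact pvConn_symm ((hiff x hxF s hsF).mp hget)
  · intro hx
    have hxF : x ∈ pvF grid :=
      (pvF_mem grid x).mpr (pvConn_five_right grid s x ((pvF_mem grid s).mp hsF) hx)
    refine ⟨hxF, ?_⟩
    have hget : (pvBLabel grid).get? x = (pvBLabel grid).get? s :=
      (hiff x hxF s hsF).mpr (pvConn_symm hx)
    rw [pvGet?_eq_some_getD _ x ((pvLab_contains grid _ hkeys x).mpr hxF) (0, 0),
      pvGet?_eq_some_getD _ s ((pvLab_contains grid _ hkeys s).mpr hsF) (0, 0)] at hget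
    simpa using Option.some_inj.mp hget

-- two descending sorted dedups agree when the underlying value sets agree
theorem pvSorted_eq (X Y : List Int) (hmem : ∀ v, v ∈ X ↔ v ∈ Y) :
    PySem.List.sorted (PySem.Set.ofList X) (fun s => s) true =
      PySem.List.sorted (PySem.Set.ofList Y) (fun s => s) true := by
  have hndX : (PySem.List.sorted (PySem.Set.ofList X) (fun s => s) true).Nodup := by
    exact (PySem.List.sorted_perm _ _ _).nodup_iff.mpr (PySem.Set.nodup_ofList X)
  have hperm : (PySem.List.sorted (PySem.Set.ofList X) (fun s => s) true).Perm
      (PySem.Set.ofList Y) := by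
    refine List.Perm.trans (PySem.List.sorted_perm _ _ _) ?_
    apply (List.perm_ext_iff_of_nodup (PySem.Set.nodup_ofList X)
      (PySem.Set.nodup_ofList Y)).mpr
    intro v
    rw [PySem.Set.mem_ofList, PySem.Set.mem_ofList]
    exact hmem v
  have hpw : (PySem.List.sorted (PySem.Set.ofList X) (fun s => s) true).Pairwise
      (fun a b => (fun s => s) b < (fun s => s) a) := by
    have h1 := PySem.List.sorted_pairwise_rev (PySem.Set.ofList X) (fun s => s)
    have h2 : (PySem.List.sorted (PySem.Set.ofList X) (fun s => s) true).Pairwise (· ≠ ·) :=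
      hndX
    exact (h1.and h2).imp (fun h => lt_of_le_of_ne h.1 (Ne.symm h.2))
  exact (PySem.List.sorted_rev_eq_of_perm_of_pairwise_gt _ _ _ hperm hpw).symm

-- ---------- the output matrix: folds of single-cell writes ----------

def pvEntry (out : List (List Int)) (i j : Nat) : Int := (out.getD i []).getD j 0

def pvShape (grid : List (List Int)) (out : List (List Int)) : Prop :=
  out.length = grid.length ∧
  ∀ i (h : i < out.length), out[i].length = (PySem.List.pyGetD grid 0 []).length

def pvWrite (out : List (List Int)) (p : Int × Int) (v : Int) : List (List Int) :=
  out.modify p.1.toNat (fun row => row.set p.2.toNat v)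

theorem pvShape_out0 (grid : List (List Int)) :
    pvShape grid ((PySem.List.pyRange 0 (pvR grid) 1).map
      (fun _ => (PySem.List.pyRange 0 (pvC grid) 1).map (fun _ => (0 : Int)))) := by
  constructor
  · simp [PySem.List.length_pyRange_one, pvR]
  · intro i h
    rw [List.getElem_map]
    simp [PySem.List.length_pyRange_one, pvC]

theorem pvEntry_const0 (R C : List Int) (i j : Nat) :
    pvEntry (R.map (fun _ => C.map (fun _ => (0 : Int)))) i j = 0 := by
  unfold pvEntry
  rcases Nat.lt_or_ge i (R.map (fun _ => C.map (fun _ => (0 : Int)))).length with h | h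
  · rw [List.getD_eq_getElem _ _ h, List.getElem_map]
    rcases Nat.lt_or_ge j (C.map fun _ => (0 : Int)).length with h2 | h2
    · rw [List.getD_eq_getElem _ _ h2, List.getElem_map]
    · rw [List.getD_eq_default _ _ h2]
  · rw [List.getD_eq_default _ _ h]
    simp

theorem pvShape_write (grid : List (List Int)) (out : List (List Int)) (p : Int × Int)
    (v : Int) (hsh : pvShape grid out) : pvShape grid (pvWrite out p v) := by
  obtain ⟨h1, h2⟩ := hsh
  refine ⟨by simpa [pvWrite] using h1, ?_⟩
  intro i h
  unfold pvWrite at h ⊢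
  by_cases he : p.1.toNat = i
  · subst he
    rw [List.getElem_modify_eq]
    rw [List.length_set]
    exact h2 _ (by simpa using h)
  · rw [List.getElem_modify_ne _ _ he]
    exact h2 _ (by simpa using h)

theorem pvEntry_eq_getElem (out : List (List Int)) (i j : Nat) (hi : i < out.length) :
    pvEntry out i j = out[i].getD j 0 := by
  unfold pvEntry
  rw [List.getD_eq_getElem _ _ hi]

theorem pvEntry_write_self (grid : List (List Int)) (out : List (List Int))
    (p : Int × Int) (v : Int) (hsh : pvShape grid out) (hb : pvInB grid p) :
    pvEntry (pvWrite out p v) p.1.toNat p.2.toNat = v := by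
  have hi : p.1.toNat < out.length := by
    rw [hsh.1]
    have h1 := hb.1
    have h2 := hb.2.1
    unfold pvR at h2
    omega
  have hi' : p.1.toNat < (pvWrite out p v).length := by
    simpa [pvWrite] using hi
  rw [pvEntry_eq_getElem _ _ _ hi']
  unfold pvWrite
  rw [List.getElem_modify_eq]
  have hj : p.2.toNat < out[p.1.toNat].length := by
    rw [hsh.2 _ hi]
    have h3 := hb.2.2.1
    have h4 := hb.2.2.2
    unfold pvC at h4
    omega
  rw [List.getD_eq_getElem _ _ (by simpa using hj)]
  rw [List.getElem_set_self]

theorem pvEntry_write_ne (grid : List (List Int)) (out : List (List Int))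
    (p : Int × Int) (v : Int) (hsh : pvShape grid out) (i j : Nat)
    (hi : i < grid.length)
    (hne : ¬(p.1.toNat = i ∧ p.2.toNat = j)) :
    pvEntry (pvWrite out p v) i j = pvEntry out i j := by
  have hilen : i < out.length := by rw [hsh.1]; exact hi
  have hilen' : i < (pvWrite out p v).length := by simpa [pvWrite] using hilen
  rw [pvEntry_eq_getElem _ _ _ hilen', pvEntry_eq_getElem _ _ _ hilen]
  unfold pvWrite
  by_cases he : p.1.toNat = i
  · subst he
    rw [List.getElem_modify_eq]
    have hj : p.2.toNat ≠ j := fun h => hne ⟨rfl, h⟩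
    rcases Nat.lt_or_ge j (out[p.1.toNat].set p.2.toNat v).length with h2 | h2
    · rw [List.getD_eq_getElem _ _ h2, List.getElem_set_ne hj,
        List.getD_eq_getElem _ _ (by simpa using h2)]
    · rw [List.getD_eq_default _ _ h2, List.getD_eq_default _ _ (by simpa using h2)]
  · rw [List.getElem_modify_ne _ _ he]

theorem pvWrites_spec (grid : List (List Int)) :
    ∀ (W : List ((Int × Int) × Int)) (out : List (List Int)),
      pvShape grid out → (∀ pc ∈ W, pvInB grid pc.1) → (W.map Prod.fst).Nodup →
      pvShape grid (W.foldl (fun o pc => pvWrite o pc.1 pc.2) out) ∧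
      ∀ i j : Nat, i < grid.length →
        pvEntry (W.foldl (fun o pc => pvWrite o pc.1 pc.2) out) i j =
          (match W.find? (fun pc => pc.1 == ((i : Int), (j : Int))) with
            | some pc => pc.2
            | none => pvEntry out i j) := by
  intro W
  induction W with
  | nil =>
    intro out hsh _ _
    exact ⟨hsh, fun i j _ => rfl⟩
  | cons pc W ih =>
    intro out hsh hb hnd
    simp only [List.foldl_cons]
    obtain ⟨ihs, ihe⟩ := ih (pvWrite out pc.1 pc.2)
      (pvShape_write grid out pc.1 pc.2 hsh)
      (fun x hx => hb x (List.mem_cons_of_mem _ hx))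
      (List.Nodup.of_cons (by simpa using hnd))
    refine ⟨ihs, ?_⟩
    intro i j hi
    rw [ihe i j hi]
    simp only [List.find?]
    by_cases hbq : (pc.1 == ((i : Int), (j : Int))) = true
    · rw [hbq]
      have hpc : pc.1 = ((i : Int), (j : Int)) := beq_iff_eq.mp hbq
      have hfn : W.find? (fun x => x.1 == ((i : Int), (j : Int))) = none := by
        rw [List.find?_eq_none]
        intro x hx hbx
        have : pc.1 ∈ W.map Prod.fst := by
          rw [hpc, ← beq_iff_eq.mp hbx]
          exact List.mem_map_of_mem hx
        exact (List.nodup_cons.mp (by simpa using hnd)).1 this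
      rw [hfn]
      have hself := pvEntry_write_self grid out pc.1 pc.2 hsh (hb pc List.mem_cons_self)
      rw [hpc] at hself ⊢
      simpa using hself
    · rw [Bool.not_eq_true] at hbq
      rw [hbq]
      have hne : ¬(pc.1.1.toNat = i ∧ pc.1.2.toNat = j) := by
        rintro ⟨h1, h2⟩
        have hbp := hb pc List.mem_cons_self
        have hb1 := hbp.1
        have hb3 := hbp.2.2.1
        have : pc.1 = ((i : Int), (j : Int)) := by
          have e1 : pc.1.1 = (i : Int) := by omega
          have e2 : pc.1.2 = (j : Int) := by omega
          exact Prod.ext e1 e2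
        rw [this] at hbq
        simp at hbq
      cases hfw : W.find? (fun x => x.1 == ((i : Int), (j : Int))) with
      | none =>
        simp only []
        exact pvEntry_write_ne grid out pc.1 pc.2 hsh i j hi hne
      | some x => rfl

-- in a list of writes with distinct cells, find? locates a member exactly
theorem pvFindW (W : List ((Int × Int) × Int)) (hnd : (W.map Prod.fst).Nodup)
    (pc : (Int × Int) × Int) (hpc : pc ∈ W) :
    W.find? (fun x => x.1 == pc.1) = some pc := by
  induction W with
  | nil => cases hpc
  | cons hd W ih =>
    simp only [List.find?]
    by_cases hb : (hd.1 == pc.1) = true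
    · rw [hb]
      rcases List.mem_cons.mp hpc with rfl | hmem
      · rfl
      · exfalso
        have : pc.1 ∈ W.map Prod.fst := List.mem_map_of_mem hmem
        rw [← beq_iff_eq.mp hb] at this
        exact (List.nodup_cons.mp (by simpa using hnd)).1 this
    · rw [Bool.not_eq_true] at hb
      rw [hb]
      rcases List.mem_cons.mp hpc with rfl | hmem
      · simp at hb
      · exact ih (List.Nodup.of_cons (by simpa using hnd)) hmem

theorem pvFindW' (W : List ((Int × Int) × Int)) (hnd : (W.map Prod.fst).Nodup)
    (pc : (Int × Int) × Int) (hpc : pc ∈ W) (k : Int × Int) (hk : pc.1 = k) :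
    W.find? (fun x => x.1 == k) = some pc := by
  rw [← hk]
  exact pvFindW W hnd pc hpc

-- a pairwise-disjoint family of nodup blobs flattens to a nodup list
theorem pvFlatten_nodup :
    ∀ (bs : List (List (Int × Int))),
      (∀ b ∈ bs, b.Nodup) →
      List.Pairwise (fun b1 b2 => ∀ q, q ∈ b1 → q ∉ b2) bs →
      (bs.flatMap (fun b => b)).Nodup := by
  intro bs
  induction bs with
  | nil => intro _ _; simp
  | cons b bs ih =>
    intro hnd hpw
    rw [List.flatMap_cons, List.nodup_append]
    refine ⟨hnd b List.mem_cons_self,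
      ih (fun x hx => hnd x (List.mem_cons_of_mem _ hx)) (List.Pairwise.of_cons hpw), ?_⟩
    intro a ha b' hb' he
    subst he
    rcases List.mem_flatMap.mp hb' with ⟨b2, hb2, hab2⟩
    exact (List.pairwise_cons.mp hpw).1 b2 hb2 a ha hab2

-- ===== VERDICT (by name: the statement is the Claim_ definition above) =====
-- ---------- final assembly ----------

theorem pvPairwise_eq {α : Type} (R : α → α → Prop) :
    ∀ (l : List α), l.Pairwise R → ∀ a ∈ l, ∀ b ∈ l, ¬ R a b → ¬ R b a → a = b := by
  intro l
  induction l with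
  | nil => intro _ a ha; cases ha
  | cons x l ih =>
    intro hpw a ha b hb hab hba
    rcases List.mem_cons.mp ha with rfl | ha' <;> rcases List.mem_cons.mp hb with rfl | hb'
    · rfl
    · exact absurd ((List.pairwise_cons.mp hpw).1 b hb') hab
    · exact absurd ((List.pairwise_cons.mp hpw).1 a ha') hba
    · exact ih (List.pairwise_cons.mp hpw).2 a ha' b hb' hab hba

theorem pvRebase (grid : List (List Int)) (b : List (Int × Int)) (s x : Int × Int)
    (hbs : ∀ y, y ∈ b ↔ pvConn grid s y) (hsx : pvConn grid s x) :
    ∀ y, y ∈ b ↔ pvConn grid x y := by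
  intro y
  rw [hbs y]
  exact ⟨fun h => pvConn_trans (pvConn_symm hsx) h, fun h => pvConn_trans hsx h⟩

theorem pvMain (grid : List (List Int)) : solve_6e82a1ae grid = solve_6e82a1ae_alt grid := by
  simp only [solve_6e82a1ae, solve_6e82a1ae_alt]
  rw [show ((grid.length : Nat) : Int) = pvR grid from rfl,
    show (((PySem.List.pyGetD grid 0 []).length : Nat) : Int) = pvC grid from rfl]
  -- A side: the scan
  obtain ⟨hSI, hcov⟩ := pvA_scan_spec grid
  -- B side: the label dict
  rw [pvLabel0_eq grid, pvBMergeFold_eq grid]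
  rw [show List.foldl (pvBStep grid) (PySem.Dict.mk ((pvF grid).map (fun p => (p, p))))
      (pvPos grid) = pvBLabel grid from rfl]
  obtain ⟨hkeys, hiff⟩ := pvBLabel_spec grid
  have hknd : ((pvBLabel grid).items.map Prod.fst).Nodup := by
    rw [hkeys]; exact pvF_nodup grid
  have hvals : (pvBLabel grid).values =
      (pvF grid).map (fun k => (pvBLabel grid).getD k (0, 0)) := by
    have h := PySem.Dict.values_eq_map_keys (pvBLabel grid) hknd (0, 0)
    rw [h]
    show List.map _ ((pvBLabel grid).items.map Prod.fst) = _
    rw [hkeys]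
  -- the size dict is a counter over the label values
  have hsz : (pvBLabel grid).items.foldl
      (fun s kv => s.insert kv.2 (s.getD kv.2 0 + 1)) (PySem.Dict.mk []) =
      PySem.Dict.counter (pvBLabel grid).values := by
    have h1 : (pvBLabel grid).items.foldl
        (fun s kv => s.insert kv.2 (s.getD kv.2 0 + 1)) (PySem.Dict.mk []) =
        ((pvBLabel grid).items.map Prod.snd).foldl
          (fun s v => s.insert v (s.getD v 0 + 1))
          (PySem.Dict.mk [] : PySem.Dict (Int × Int) Int) := by
      rw [List.foldl_map]
    exact h1.trans (PySem.Dict.foldl_insert_getD_add_one_eq_counter _)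
  rw [hsz]
  -- helper: every five cell sits in a blob whose size is its label's count
  have hblob : ∀ x : Int × Int, pvFive grid x →
      ∃ b ∈ (pvAScan grid (pvR grid) (pvC grid)
          (5 * grid.length * (PySem.List.pyGetD grid 0 []).length + 5)).2,
        x ∈ b ∧ ((pvBLabel grid).values.count ((pvBLabel grid).getD x (0, 0))) = b.length := by
    intro x h5
    have hx1 := (hcov x).mp h5
    obtain ⟨b, hbmem, hxb⟩ := (hSI.covered x).mp hx1
    obtain ⟨hbnd, s, hbs⟩ := hSI.blob_good b hbmem
    have hbs' := pvRebase grid b s x hbs ((hbs x).mp hxb)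
    exact ⟨b, hbmem, hxb,
      pvClass_count grid b hbnd x ((pvF_mem grid x).mpr h5) hbs'⟩
  -- the two size sets have the same members
  have hsizes : ∀ v : Int,
      (v ∈ (pvAScan grid (pvR grid) (pvC grid)
          (5 * grid.length * (PySem.List.pyGetD grid 0 []).length + 5)).2.map
            (fun b => (b.length : Int))) ↔
      v ∈ (PySem.Dict.counter (pvBLabel grid).values).values := by
    intro v
    have hBvals : (PySem.Dict.counter (pvBLabel grid).values).values =
        (PySem.Set.ofList (pvBLabel grid).values).map
          (fun k => (((pvBLabel grid).values.count k : Nat) : Int)) := by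
      show ((PySem.Dict.counter (pvBLabel grid).values).items.map Prod.snd) = _
      rw [PySem.Dict.items_counter]
      rw [List.map_map]
      rfl
    rw [hBvals]
    constructor
    · intro hv
      obtain ⟨b, hbmem, hlen⟩ := List.mem_map.mp hv
      obtain ⟨hbnd, s, hbs⟩ := hSI.blob_good b hbmem
      have hsb : s ∈ b := (hbs s).mpr Relation.ReflTransGen.refl
      have h5s : pvFive grid s :=
        hSI.v_five s ((hSI.covered s).mpr ⟨b, hbmem, hsb⟩)
      obtain ⟨b', hbmem', hsb', hcount⟩ := hblob s h5s
      -- b and b' share s, so they are the same blob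
      have hbb : b = b' := by
        refine pvPairwise_eq _ _ hSI.disj b hbmem b' hbmem' ?_ ?_
        · exact fun h => h s hsb hsb'
        · exact fun h => h s hsb' hsb
      apply List.mem_map.mpr
      refine ⟨(pvBLabel grid).getD s (0, 0), ?_, ?_⟩
      · apply (PySem.Set.mem_ofList _ _).mpr
        rw [hvals]
        exact List.mem_map_of_mem ((pvF_mem grid s).mpr h5s)
      · rw [hcount, ← hbb]
        exact hlen
    · intro hv
      obtain ⟨k, hkmem, hkv⟩ := List.mem_map.mp hv
      have hkmem' : k ∈ (pvBLabel grid).values := (PySem.Set.mem_ofList _ _).mp hkmem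
      rw [hvals] at hkmem'
      obtain ⟨x, hxF, hxk⟩ := List.mem_map.mp hkmem'
      have h5x : pvFive grid x := (pvF_mem grid x).mp hxF
      obtain ⟨b, hbmem, hxb, hcount⟩ := hblob x h5x
      apply List.mem_map.mpr
      refine ⟨b, hbmem, ?_⟩
      rw [← hkv, ← hxk, hcount]
  -- hence the two sorted distinct-size lists coincide
  have hsort := pvSorted_eq _ _ hsizes
  rw [hsort]
  -- name the shared pieces
  set blobs := (pvAScan grid (pvR grid) (pvC grid)
    (5 * grid.length * (PySem.List.pyGetD grid 0 []).length + 5)).2 with hblobs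
  set RK := (PySem.List.enumerate (PySem.List.sorted
      (PySem.Set.ofList (PySem.Dict.counter (pvBLabel grid).values).values)
      (fun s => s) true) 0).foldl
    (fun d is => PySem.Dict.insert d is.2 (is.1 + 1))
    (PySem.Dict.mk [] : PySem.Dict Int Int) with hRK
  set OUT0 := (PySem.List.pyRange 0 (pvR grid) 1).map
    (fun _ => (PySem.List.pyRange 0 (pvC grid) 1).map (fun _ => (0 : Int))) with hOUT0
  set W := blobs.flatMap
    (fun b => b.map (fun p => (p, RK.getD (b.length : Int) 0))) with hWdef
  -- the A-side nested write loops are one flat list of writes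
  have hAout : List.foldl (fun (out : List (List Int)) (b : List (Int × Int)) =>
      List.foldl (fun out p =>
        out.modify p.1.toNat fun row => row.set p.2.toNat (RK.getD (↑b.length) 0)) out b)
      OUT0 blobs = W.foldl (fun o pc => pvWrite o pc.1 pc.2) OUT0 := by
    rw [hWdef, pvFoldl_flatMap]
    simp only [List.foldl_map]
    rfl
  rw [hAout]
  have hWin : ∀ pc ∈ W, pvInB grid pc.1 := by
    intro pc hpc
    rw [hWdef] at hpc
    obtain ⟨b, hb, hmem⟩ := List.mem_flatMap.mp hpc
    obtain ⟨p, hp, rfl⟩ := List.mem_map.mp hmem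
    exact (hSI.v_five p ((hSI.covered p).mpr ⟨b, hb, hp⟩)).1
  have hWfst : W.map Prod.fst = blobs.flatMap (fun b => b) := by
    rw [hWdef, List.map_flatMap]
    simp [Function.comp_def]
  have hWnd : (W.map Prod.fst).Nodup := by
    rw [hWfst]
    exact pvFlatten_nodup blobs (fun b hb => (hSI.blob_good b hb).1) hSI.disj
  obtain ⟨hshape, hentry⟩ := pvWrites_spec grid W OUT0 (pvShape_out0 grid) hWin hWnd
  apply List.ext_getElem
  · rw [hshape.1]
    simp [PySem.List.length_pyRange_one, pvR]
  intro i hi1 hi2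
  have hi' : i < grid.length := by rw [← hshape.1]; exact hi1
  apply List.ext_getElem
  · rw [hshape.2 i hi1, List.getElem_map]
    simp [PySem.List.length_pyRange_one, pvC]
  intro j hj1 hj2
  have hj' : j < (PySem.List.pyGetD grid 0 []).length := by
    rw [← hshape.2 i hi1]; exact hj1
  have hA : (W.foldl (fun o pc => pvWrite o pc.1 pc.2) OUT0)[i][j] =
      pvEntry (W.foldl (fun o pc => pvWrite o pc.1 pc.2) OUT0) i j := by
    rw [pvEntry_eq_getElem _ _ _ hi1, List.getD_eq_getElem _ _ hj1]
  rw [hA, hentry i j hi']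
  simp only [List.getElem_map, PySem.List.getElem_pyRange_one, zero_add]
  by_cases h5 : pvFive grid ((i : Int), (j : Int))
  · -- a 5-cell: both sides give the rank color of its component size
    obtain ⟨b, hb, hqb, hcount⟩ := hblob ((i : Int), (j : Int)) h5
    have hpcW : (((i : Int), (j : Int)), RK.getD ((b.length : Nat) : Int) 0) ∈ W := by
      rw [hWdef]
      exact List.mem_flatMap.mpr ⟨b, hb, List.mem_map_of_mem hqb⟩
    rw [pvFindW' W hWnd _ hpcW ((i : Int), (j : Int)) rfl]
    have hcontains : (pvBLabel grid).contains ((i : Int), (j : Int)) = true :=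
      (pvLab_contains grid _ hkeys _).mpr ((pvF_mem grid _).mpr h5)
    rw [if_pos hcontains]
    have hval : (pvBLabel grid).getD ((i : Int), (j : Int)) ((i : Int), (j : Int)) =
        (pvBLabel grid).getD ((i : Int), (j : Int)) (0, 0) := by
      have h1 := pvGet?_eq_some_getD (pvBLabel grid) _ hcontains ((i : Int), (j : Int))
      have h2 := pvGet?_eq_some_getD (pvBLabel grid) _ hcontains (0, 0)
      rw [h1] at h2
      exact Option.some_inj.mp h2
    rw [hval, PySem.Dict.getD_counter, hcount]
  · -- not a 5-cell: zero on both sides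
    have hfind : W.find? (fun pc => pc.1 == ((i : Int), (j : Int))) = none := by
      rw [List.find?_eq_none]
      intro x hx hbx
      rw [hWdef] at hx
      obtain ⟨b, hb, hmem⟩ := List.mem_flatMap.mp hx
      obtain ⟨p, hp, rfl⟩ := List.mem_map.mp hmem
      apply h5
      have : p = ((i : Int), (j : Int)) := by simpa using hbx
      rw [← this]
      exact hSI.v_five p ((hSI.covered p).mpr ⟨b, hb, hp⟩)
    rw [hfind]
    have hcontains : (pvBLabel grid).contains ((i : Int), (j : Int)) = false := by
      rw [← Bool.not_eq_true]
      intro hc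
      exact h5 ((pvF_mem grid _).mp ((pvLab_contains grid _ hkeys _).mp hc))
    rw [if_neg (by rw [hcontains]; exact Bool.false_ne_true)]
    rw [hOUT0]
    exact pvEntry_const0 _ _ i j


theorem solve_6e82a1ae_spec : Claim_equal_solve_6e82a1ae := by
  intro grid _ _
  exact (pvMain grid).symm ▸ rfl
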